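-- pv_equiv track=rewrite | github.com/Lalbahadur786/Python-DSA | mathmetics/computing_power.py | comp_pow
-- ===== SOURCE A (Python) =====
-- def comp_pow(i, n):
--     temp = 0
--     if n == 0:
--         return 1
--     temp = comp_pow(i, n // 2)
--     if n % 2 == 0:
--         return temp * temp
--     else:
--         return i * temp * temp
-- ===== SOURCE B (Python) =====
-- def comp_pow(i, n):
--     result = 1
--     base = i
--     while n > 0:
--         if n % 2 == 1:
--             result *= base
--         base *= base
--         n //= 2
--     return result
-- ===== Notes on version B (the rewrite author's own statement) =====
-- stated objective: alternative
-- what changed: Replaces the top-down recursive exponentiation-by-squaring with an iterative bottom-up loop that walks the bits of n (result/base accumulators) instead of a call stack.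
import Mathlib
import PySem

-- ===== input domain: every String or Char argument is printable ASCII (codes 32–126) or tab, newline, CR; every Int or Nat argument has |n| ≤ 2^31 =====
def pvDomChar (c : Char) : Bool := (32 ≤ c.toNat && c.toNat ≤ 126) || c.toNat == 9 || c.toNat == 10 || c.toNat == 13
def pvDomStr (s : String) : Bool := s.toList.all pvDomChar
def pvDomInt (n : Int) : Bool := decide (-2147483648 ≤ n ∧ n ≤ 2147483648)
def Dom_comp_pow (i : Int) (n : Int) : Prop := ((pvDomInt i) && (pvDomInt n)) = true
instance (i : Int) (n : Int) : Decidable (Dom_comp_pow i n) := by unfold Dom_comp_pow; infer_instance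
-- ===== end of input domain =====

-- B replaces A's top-down recursive squaring with an iterative bottom-up bit-walking loop (same cost, no call stack).

-- ===== PORT A =====
-- recursive exponentiation by squaring; for n < 0 Python recurses forever (excluded by Pre_),
-- the 'n < 0 → 1' branch is only a totality guard for inputs outside Pre_.
def comp_pow (i : Int) (n : Int) : Int :=
  if n = 0 then 1
  else if n < 0 then 1
  else
    let temp := comp_pow i (PySem.Int.floordiv n 2)
    if PySem.Int.mod n 2 = 0 then temp * temp else i * temp * temp
termination_by n.toNat
decreasing_by
  rw [PySem.Int.floordiv_eq_ediv_of_pos (by omega : (0:Int) < 2)]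
  omega

-- ===== PORT B =====
-- iterative loop: while n > 0, multiply result when low bit set, square base, halve n
def compPowLoop (result : Int) (base : Int) (n : Int) : Int :=
  if 0 < n then
    compPowLoop (if PySem.Int.mod n 2 = 1 then result * base else result)
      (base * base) (PySem.Int.floordiv n 2)
  else result
termination_by n.toNat
decreasing_by
  rw [PySem.Int.floordiv_eq_ediv_of_pos (by omega : (0:Int) < 2)]
  omega

def comp_pow_alt (i : Int) (n : Int) : Int := compPowLoop 1 i n

-- ===== PRECONDITION & SPEC =====
-- Pre_ excludes n < 0, on which A's recursion never terminates (RecursionError).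
def Pre_comp_pow (i : Int) (n : Int) : Prop := 0 ≤ n
instance (i : Int) (n : Int) : Decidable (Pre_comp_pow i n) := by unfold Pre_comp_pow; infer_instance
def pvWitness_comp_pow : Int × Int := (3, 5)

def Spec_comp_pow (i : Int) (n : Int) (out : Int) : Prop := out = comp_pow_alt i n
instance (i : Int) (n : Int) (out : Int) : Decidable (Spec_comp_pow i n out) := by unfold Spec_comp_pow; infer_instance

-- ===== CLAIM =====
def Claim_equal_comp_pow : Prop := ∀ (i : Int) (n : Int), Dom_comp_pow i n → Pre_comp_pow i n → Spec_comp_pow i n (comp_pow i n)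

-- ===== LEMMAS AND PROOFS =====
theorem comp_pow_nat (i : Int) : ∀ (m : Nat), comp_pow i (m : Int) = i ^ m := by
  intro m
  induction m using Nat.strong_induction_on with
  | _ m ih =>
    rw [comp_pow]
    rcases Nat.eq_zero_or_pos m with h0 | hpos
    · simp [h0]
    · have hne : (m : Int) ≠ 0 := by exact_mod_cast Nat.pos_iff_ne_zero.mp hpos
      have hnlt : ¬ ((m : Int) < 0) := by omega
      simp only [hne, hnlt, if_false]
      have hfd : PySem.Int.floordiv (m : Int) 2 = ((m / 2 : Nat) : Int) := by
        exact_mod_cast PySem.Int.floordiv_natCast m 2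
      have hmd : PySem.Int.mod (m : Int) 2 = ((m % 2 : Nat) : Int) := by
        exact_mod_cast PySem.Int.mod_natCast m 2
      rw [hfd, hmd, ih (m / 2) (Nat.div_lt_self hpos (by omega))]
      rcases Nat.even_or_odd m with he | ho
      · have h2 : m % 2 = 0 := Nat.even_iff.mp he
        have hm : 2 * (m / 2) = m := by omega
        simp only [h2, Nat.cast_zero, if_true]
        have hm : m / 2 + m / 2 = m := by omega
        rw [← pow_add, hm]
      · have h2 : m % 2 = 1 := Nat.odd_iff.mp ho
        have hne1 : ((m % 2 : Nat) : Int) ≠ 0 := by rw [h2]; norm_num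
        simp only [hne1, if_false]
        have hm : m / 2 + m / 2 + 1 = m := by omega
        rw [mul_assoc, ← pow_add, ← pow_succ', hm]

theorem compPowLoop_nat : ∀ (m : Nat) (r b : Int), compPowLoop r b (m : Int) = r * b ^ m := by
  intro m
  induction m using Nat.strong_induction_on with
  | _ m ih =>
    intro r b
    rw [compPowLoop]
    rcases Nat.eq_zero_or_pos m with h0 | hpos
    · simp [h0]
    · have hlt : (0:Int) < (m : Int) := by exact_mod_cast hpos
      simp only [hlt, if_true]
      have hfd : PySem.Int.floordiv (m : Int) 2 = ((m / 2 : Nat) : Int) := by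
        exact_mod_cast PySem.Int.floordiv_natCast m 2
      have hmd : PySem.Int.mod (m : Int) 2 = ((m % 2 : Nat) : Int) := by
        exact_mod_cast PySem.Int.mod_natCast m 2
      rw [hfd, hmd, ih (m / 2) (Nat.div_lt_self hpos (by omega))]
      rcases Nat.even_or_odd m with he | ho
      · have h2 : m % 2 = 0 := Nat.even_iff.mp he
        have hne : ((m % 2 : Nat) : Int) ≠ 1 := by rw [h2]; norm_num
        simp only [hne, if_false]
        have hbb : b * b = b ^ 2 := (sq b).symm
        have hm : 2 * (m / 2) = m := by omega
        rw [hbb, ← pow_mul, hm]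
      · have h2 : m % 2 = 1 := Nat.odd_iff.mp ho
        simp only [h2, Nat.cast_one, if_true]
        have hbb : b * b = b ^ 2 := (sq b).symm
        have hm : 2 * (m / 2) + 1 = m := by omega
        rw [hbb, ← pow_mul, mul_assoc, ← pow_succ', hm]

-- ===== VERDICT =====
theorem comp_pow_spec : Claim_equal_comp_pow := by
  intro i n _ hpre
  unfold Spec_comp_pow comp_pow_alt
  obtain ⟨m, rfl⟩ : ∃ m : Nat, n = (m : Int) := ⟨n.toNat, (Int.toNat_of_nonneg hpre).symm⟩
  rw [comp_pow_nat, compPowLoop_nat, one_mul]
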